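-- pv_equiv track=rewrite | github.com/AshwinManohar1/nursing-be | api/agent/modification_agent/tool_implementation.py | _map_day_names_to_indices
-- ===== SOURCE A (Python) =====
-- from typing import Any, Dict, Optional, List
--
-- def _map_day_names_to_indices(day_names: List[str], day_mapping: Dict[int, str]) -> List[int]:
--     """Map day names to day indices."""
--     indices = []
--
--     # Create reverse mapping: lowercase day name -> index
--     reverse_map = {}
--     for idx, date_str in day_mapping.items():
--         if "(" in date_str and ")" in date_str:
--             day_name = date_str.split("(")[1].split(")")[0].lower()
--             reverse_map[day_name] = idx
--
--     for day_name in day_names: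
--         day_lower = day_name.lower().strip()
--         if day_lower in reverse_map:
--             indices.append(reverse_map[day_lower])
--
--     return indices
-- ===== SOURCE B (Python) =====
-- def _map_day_names_to_indices(day_names, day_mapping):
--     """Map day names to day indices by scanning the mapping per query (no reverse table)."""
--     indices = []
--     for day_name in day_names:
--         target = day_name.lower().strip()
--         found = None
--         for idx, date_str in day_mapping.items():
--             if "(" in date_str and ")" in date_str:
--                 if date_str.split("(")[1].split(")")[0].lower() == target:
--                     found = idx  # keep scanning: last match wins (dict-overwrite semantics)
--         if found is not None:
--             indices.append(found)
--     return indices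
-- ===== Notes on version B (the rewrite author's own statement) =====
-- stated objective: alternative
-- what changed: B drops A's build-reverse-dict-then-lookup two-pass and instead, for each day name, scans day_mapping.items() directly, remembering the last parsed-name match.
import Mathlib
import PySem

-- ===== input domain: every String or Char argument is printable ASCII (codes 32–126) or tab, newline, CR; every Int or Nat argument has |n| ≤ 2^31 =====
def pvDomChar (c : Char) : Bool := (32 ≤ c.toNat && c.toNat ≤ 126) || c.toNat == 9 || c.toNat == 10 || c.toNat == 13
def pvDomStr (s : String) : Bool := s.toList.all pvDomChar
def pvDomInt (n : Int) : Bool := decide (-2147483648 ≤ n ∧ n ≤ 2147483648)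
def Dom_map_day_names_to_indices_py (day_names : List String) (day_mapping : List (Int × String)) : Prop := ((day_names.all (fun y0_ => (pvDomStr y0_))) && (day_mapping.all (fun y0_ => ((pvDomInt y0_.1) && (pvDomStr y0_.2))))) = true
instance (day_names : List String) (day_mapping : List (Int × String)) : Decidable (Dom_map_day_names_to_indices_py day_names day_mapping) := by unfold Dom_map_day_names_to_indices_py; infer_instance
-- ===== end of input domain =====

-- B replaces A's build-reverse-dict-then-lookup two-pass with a direct per-name scan of the
-- mapping items (last match wins); alternative decomposition, no speed claim.

-- shared parse expression of both Pythons: date_str.split("(")[1].split(")")[0].lower()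
-- (Python's [1]/[0] indexing ported as getD: under the '(' / ')' guard both indices are in range)
def pvParsedLow (s : String) : String :=
  PySem.Str.lower (((PySem.Str.split? ((PySem.Str.split? s "(").getD [] |>.getD 1 "") ")").getD []).getD 0 "")

-- shared guard of both Pythons: '"(" in date_str and ")" in date_str'
def pvGuard (s : String) : Bool := PySem.Str.isIn "(" s && PySem.Str.isIn ")" s

-- ===== PORT A =====
def map_day_names_to_indices_py (day_names : List String) (day_mapping : List (Int × String)) : List Int :=
  let items := (PySem.Dict.ofList day_mapping).items
  let revMap : PySem.Dict String Int :=
    items.foldl (fun d p => if pvGuard p.2 then d.insert (pvParsedLow p.2) p.1 else d)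
      PySem.Dict.empty
  day_names.foldl (fun acc name =>
    let key := PySem.Str.strip (PySem.Str.lower name)
    match revMap.get? key with
    | some v => acc ++ [v]
    | none => acc) []

-- ===== PORT B =====
def map_day_names_to_indices_py_alt (day_names : List String) (day_mapping : List (Int × String)) : List Int :=
  let items := (PySem.Dict.ofList day_mapping).items
  day_names.foldl (fun acc name =>
    let target := PySem.Str.strip (PySem.Str.lower name)
    let found := items.foldl (fun f p =>
      if pvGuard p.2 then (if pvParsedLow p.2 == target then some p.1 else f) else f)
      (none : Option Int)
    match found with
    | some v => acc ++ [v]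
    | none => acc) []

-- ===== PRECONDITION & SPEC =====
def Spec_map_day_names_to_indices_py (day_names : List String) (day_mapping : List (Int × String)) (out : List Int) : Prop := out = map_day_names_to_indices_py_alt day_names day_mapping
instance (day_names : List String) (day_mapping : List (Int × String)) (out : List Int) : Decidable (Spec_map_day_names_to_indices_py day_names day_mapping out) := by unfold Spec_map_day_names_to_indices_py; infer_instance

-- ===== CLAIM (what is proved, stated in full; the proofs are below) =====
def Claim_equal_map_day_names_to_indices_py : Prop := ∀ (day_names : List String) (day_mapping : List (Int × String)), Dom_map_day_names_to_indices_py day_names day_mapping → Spec_map_day_names_to_indices_py day_names day_mapping (map_day_names_to_indices_py day_names day_mapping)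

-- ===== LEMMAS AND PROOFS =====

-- lookup in A's reverse map = B's last-match scan over the same items
theorem pvRev_get (l : List (Int × String)) (d : PySem.Dict String Int) (t : String) :
    (l.foldl (fun d p => if pvGuard p.2 then d.insert (pvParsedLow p.2) p.1 else d) d).get? t
      = l.foldl (fun f p =>
          if pvGuard p.2 then (if pvParsedLow p.2 == t then some p.1 else f) else f) (d.get? t) := by
  induction l generalizing d with
  | nil => rfl
  | cons p l ih =>
    simp only [List.foldl_cons]
    by_cases h : pvGuard p.2 = true
    · have hx : ((d.insert (pvParsedLow p.2) p.1).get? t)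
          = (if pvParsedLow p.2 == t then some p.1 else d.get? t) := by
        rw [PySem.Dict.get?_insert]
        by_cases he : pvParsedLow p.2 = t
        · simp [he]
        · simp [beq_iff_eq, he, Ne.symm he]
      simp only [h, if_true, ih, hx]
    · simp only [h, if_false, Bool.false_eq_true, ih]

-- ===== VERDICT (by name: the statement is the Claim_ definition above) =====
theorem map_day_names_to_indices_py_spec : Claim_equal_map_day_names_to_indices_py := by
  intro day_names day_mapping _
  unfold Spec_map_day_names_to_indices_py map_day_names_to_indices_py map_day_names_to_indices_py_alt
  apply PySem.List.foldl_congr_mem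
  intro acc name _
  simp only [pvRev_get, PySem.Dict.get?_empty]
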